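-- pv_equiv track=rewrite | github.com/Danilow88/jiradashl1 | l1_dashboard.py | get_field_id_by_name
-- ===== SOURCE A (Python) =====
-- def get_field_id_by_name(fields_list, name):
--     """Return field id for a given field name (exact, then case-insensitive, then partial)."""
--     if not name:
--         return None
--     name_clean = name.strip().lower()
--     # 1) Exact match
--     for f in fields_list:
--         if f.get('name') == name:
--             return f.get('id')
--     # 2) Case-insensitive
--     for f in fields_list:
--         if (f.get('name') or '').strip().lower() == name_clean:
--             return f.get('id')
--     # 3) Partial: search name inside field name (e.g. "Time to resolution" in "Time to resolution (days)")
--     for f in fields_list: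
--         fn = (f.get('name') or '').strip().lower()
--         if name_clean in fn or fn in name_clean:
--             return f.get('id')
--     return None
-- ===== SOURCE B (Python) =====
-- def get_field_id_by_name(fields_list, name):
--     """Return field id for a given field name (exact, then case-insensitive, then partial).
--
--     Single pass: exact match returns immediately; the first case-insensitive
--     and first partial candidates are remembered in slots and used afterwards.
--     """
--     if not name:
--         return None
--     name_clean = name.strip().lower()
--     ci_set = part_set = False
--     ci = part = None
--     for f in fields_list:
--         if f.get('name') == name:
--             return f.get('id')
--         fn = (f.get('name') or '').strip().lower()
--         if fn == name_clean:
--             if not ci_set: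
--                 ci_set, ci = True, f.get('id')
--         elif (name_clean in fn or fn in name_clean) and not part_set:
--             part_set, part = True, f.get('id')
--     if ci_set:
--         return ci
--     if part_set:
--         return part
--     return None
-- ===== Notes on version B (the rewrite author's own statement) =====
-- stated objective: alternative
-- what changed: Replaces A's three sequential scans over fields_list with a single pass that returns on an exact match and records the first case-insensitive and first partial candidates in slots, resolved after the loop.
import Mathlib
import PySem

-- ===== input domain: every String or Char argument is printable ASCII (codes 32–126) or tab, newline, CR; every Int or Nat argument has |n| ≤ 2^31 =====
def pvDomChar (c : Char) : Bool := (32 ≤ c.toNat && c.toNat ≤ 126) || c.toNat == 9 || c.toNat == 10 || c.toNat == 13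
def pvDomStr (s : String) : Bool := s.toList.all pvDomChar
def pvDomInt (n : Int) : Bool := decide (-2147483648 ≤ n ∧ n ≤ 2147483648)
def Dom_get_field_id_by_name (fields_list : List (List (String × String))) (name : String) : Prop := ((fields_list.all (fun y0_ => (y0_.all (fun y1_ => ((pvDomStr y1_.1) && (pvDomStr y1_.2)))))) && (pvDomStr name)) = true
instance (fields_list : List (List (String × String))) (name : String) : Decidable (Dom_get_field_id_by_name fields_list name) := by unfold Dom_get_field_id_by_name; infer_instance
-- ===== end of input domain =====

-- B replaces A's three sequential scans by a single pass with two candidate slots (first case-insensitive and first partial match), resolved after the loop; same return value.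

-- shared accessors / predicates (f.get(k); (f.get('name') or '').strip().lower(); the three match tests)
def pvGet (f : List (String × String)) (k : String) : Option String :=
  PySem.Dict.get? (PySem.Dict.mk f) k

def pvClean (s : String) : String := PySem.Str.lower (PySem.Str.strip s)

def pvP1 (name : String) (f : List (String × String)) : Bool :=
  pvGet f "name" == some name

def pvP2 (name_clean : String) (f : List (String × String)) : Bool :=
  pvClean ((pvGet f "name").getD "") == name_clean

def pvP3 (name_clean : String) (f : List (String × String)) : Bool :=
  let fn := pvClean ((pvGet f "name").getD "")
  PySem.Str.isIn name_clean fn || PySem.Str.isIn fn name_clean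

-- ===== PORT A =====
def get_field_id_by_name (fields_list : List (List (String × String))) (name : String) : Option String :=
  if name = "" then none
  else
    let name_clean := pvClean name
    match fields_list.find? (pvP1 name) with
    | some f => pvGet f "id"
    | none =>
      match fields_list.find? (pvP2 name_clean) with
      | some f => pvGet f "id"
      | none =>
        match fields_list.find? (pvP3 name_clean) with
        | some f => pvGet f "id"
        | none => none

-- ===== PORT B =====
-- one pass; ci/part slots: none = unset, some v = slot holds candidate id v (itself an Option String)
def pvAltLoop (name name_clean : String) (fs : List (List (String × String)))
    (ci part : Option (Option String)) : Option String :=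
  match fs with
  | [] =>
    match ci with
    | some v => v
    | none =>
      match part with
      | some v => v
      | none => none
  | f :: rest =>
    if pvP1 name f then pvGet f "id"
    else if pvP2 name_clean f then
      pvAltLoop name name_clean rest (if ci.isNone then some (pvGet f "id") else ci) part
    else if pvP3 name_clean f && part.isNone then
      pvAltLoop name name_clean rest ci (some (pvGet f "id"))
    else pvAltLoop name name_clean rest ci part

def get_field_id_by_name_alt (fields_list : List (List (String × String))) (name : String) : Option String :=
  if name = "" then none
  else pvAltLoop name (pvClean name) fields_list none none

-- ===== PRECONDITION & SPEC =====
def Spec_get_field_id_by_name (fields_list : List (List (String × String))) (name : String) (out : Option String) : Prop := out = get_field_id_by_name_alt fields_list name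
instance (fields_list : List (List (String × String))) (name : String) (out : Option String) : Decidable (Spec_get_field_id_by_name fields_list name out) := by unfold Spec_get_field_id_by_name; infer_instance

-- ===== CLAIM (what is proved, stated in full; the proofs are below) =====
def Claim_equal_get_field_id_by_name : Prop := ∀ (fields_list : List (List (String × String))) (name : String), Dom_get_field_id_by_name fields_list name → Spec_get_field_id_by_name fields_list name (get_field_id_by_name fields_list name)

-- ===== LEMMAS AND PROOFS =====

-- when q finds nothing, filtering q out of p does not change find? p
lemma find?_and_not {α : Type} (p q : α → Bool) (l : List α) (h : l.find? q = none) :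
    l.find? (fun x => p x && !q x) = l.find? p := by
  induction l with
  | nil => rfl
  | cons a t ih =>
    rw [List.find?_eq_none] at h
    have ha : q a = false := by
      have := h a (by simp)
      simpa using this
    have ht : t.find? q = none := by
      rw [List.find?_eq_none]; exact fun x hx => h x (by simp [hx])
    simp [List.find?_cons, ha, ih ht]

-- the one-pass loop computes A's three-scan chain, for any slot states
lemma pvAltLoop_spec (name nc : String) (fs : List (List (String × String)))
    (ci part : Option (Option String)) :
    pvAltLoop name nc fs ci part =
      match fs.find? (pvP1 name) with
      | some f => pvGet f "id"
      | none =>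
        match ci with
        | some v => v
        | none =>
          match fs.find? (pvP2 nc) with
          | some f => pvGet f "id"
          | none =>
            match part with
            | some v => v
            | none =>
              match fs.find? (fun f => pvP3 nc f && !pvP2 nc f) with
              | some f => pvGet f "id"
              | none => none := by
  induction fs generalizing ci part with
  | nil => cases ci <;> cases part <;> rfl
  | cons f rest ih =>
    by_cases h1 : pvP1 name f
    · simp [pvAltLoop, h1]
    · by_cases h2 : pvP2 nc f
      · rw [pvAltLoop]
        simp only [h1, if_false, h2, if_true, Bool.false_eq_true]
        rw [ih]
        cases ci with
        | some v => simp [h1]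
        | none => simp [h1, h2]
      · by_cases h3 : pvP3 nc f
        · cases part with
          | some v =>
            rw [pvAltLoop]
            simp only [h1, h2, Bool.false_eq_true, if_false, Option.isNone_some,
              Bool.and_false]
            rw [ih]
            simp [h1, h2]
          | none =>
            rw [pvAltLoop]
            simp only [h1, h2, h3, Bool.false_eq_true, if_false, Option.isNone_none,
              Bool.and_true, if_true]
            rw [ih]
            simp [h1, h2, h3]
        · rw [pvAltLoop]
          simp only [h1, h2, h3, Bool.false_eq_true, if_false, Bool.false_and]
          rw [ih]
          cases part <;> simp [h1, h2, h3]

-- ===== VERDICT (by name: the statement is the Claim_ definition above) =====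
theorem get_field_id_by_name_spec : Claim_equal_get_field_id_by_name := by
  intro fields_list name _
  unfold Spec_get_field_id_by_name get_field_id_by_name get_field_id_by_name_alt
  by_cases hn : name = ""
  · simp [hn]
  · simp only [hn, if_false]
    rw [pvAltLoop_spec]
    cases hf1 : fields_list.find? (pvP1 name) with
    | some f => rfl
    | none =>
      cases hf2 : fields_list.find? (pvP2 (pvClean name)) with
      | some f => rfl
      | none =>
        rw [find?_and_not _ _ _ hf2]
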